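-- pv_equiv track=rewrite | github.com/Kendikane1/AbominalInsanity | Gen_modelling_project/helper_files/create_clean_notebook.py | make_source
-- ===== SOURCE A (Python) =====
-- def make_source(text):
--     """Convert multi-line string into notebook source format."""
--     lines = text.split('\n')
--     result = []
--     for i, line in enumerate(lines):
--         if i < len(lines) - 1:
--             result.append(line + '\n')
--         else:
--             result.append(line)
--     return result
-- ===== SOURCE B (Python) =====
-- def make_source(text):
--     """Convert multi-line string into notebook source format."""
--     result = []
--     current = ''
--     for ch in text:
--         current += ch
--         if ch == '\n':
--             result.append(current)
--             current = ''
--     result.append(current)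
--     return result
-- ===== Notes on version B (the rewrite author's own statement) =====
-- stated objective: alternative
-- what changed: Replaces split-on-newline followed by an enumerate loop that re-appends newlines with a single character scan that builds each newline-terminated line directly in a buffer.
import Mathlib
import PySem

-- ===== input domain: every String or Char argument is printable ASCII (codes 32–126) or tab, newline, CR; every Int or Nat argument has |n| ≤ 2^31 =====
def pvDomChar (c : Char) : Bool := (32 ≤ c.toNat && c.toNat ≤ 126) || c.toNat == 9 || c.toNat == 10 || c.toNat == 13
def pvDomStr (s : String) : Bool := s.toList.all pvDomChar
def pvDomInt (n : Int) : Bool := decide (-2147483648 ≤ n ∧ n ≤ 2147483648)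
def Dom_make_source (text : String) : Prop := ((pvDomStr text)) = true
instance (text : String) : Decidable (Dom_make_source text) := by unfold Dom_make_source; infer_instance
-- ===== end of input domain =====

-- B replaces split-then-reappend-newlines by a single buffer-based character scan; same cost, different decomposition.

-- ===== PORT A =====
def make_source (text : String) : List String :=
  let lines := PySem.Chars.splitOn text.toList "\n".toList
  (PySem.List.enumerate lines).foldl
    (fun result il =>
      if il.1 < (lines.length : Int) - 1 then result ++ [String.ofList (il.2 ++ ['\n'])]
      else result ++ [String.ofList il.2]) []

-- ===== PORT B =====
def msAltGo : List Char → List Char → List String → List String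
  | [], cur, res => res ++ [String.ofList cur]
  | c :: rest, cur, res =>
      if c == '\n' then msAltGo rest [] (res ++ [String.ofList (cur ++ [c])])
      else msAltGo rest (cur ++ [c]) res

def make_source_alt (text : String) : List String := msAltGo text.toList [] []

-- ===== PRECONDITION & SPEC =====
def Spec_make_source (text : String) (out : List String) : Prop := out = make_source_alt text
instance (text : String) (out : List String) : Decidable (Spec_make_source text out) := by unfold Spec_make_source; infer_instance

-- ===== CLAIM (what is proved, stated in full; the proofs are below) =====
def Claim_equal_make_source : Prop := ∀ (text : String), Dom_make_source text → Spec_make_source text (make_source text)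

-- ===== LEMMAS AND PROOFS =====

-- glue: the common normal form — all pieces but the last get '\n' appended
def msGlue : List (List Char) → List String
  | [] => []
  | [p] => [String.ofList p]
  | p :: q :: ps => String.ofList (p ++ ['\n']) :: msGlue (q :: ps)

theorem splitOn_go_newline (l : List Char) : ∀ (fuel : Nat) (cur : List Char) (acc : List (List Char)),
    l.length ≤ fuel →
    PySem.Chars.splitOn.go ['\n'] fuel l cur acc
      = acc.reverse ++ (List.splitOnP (· == '\n') l).modifyHead (cur.reverse ++ ·) := by
  induction l with
  | nil =>
      intro fuel cur acc _
      cases fuel <;> simp [PySem.Chars.splitOn.go, List.splitOnP_nil]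
  | cons c rest ih =>
      intro fuel cur acc hf
      cases fuel with
      | zero => simp at hf
      | succ fuel =>
        simp only [PySem.Chars.splitOn.go, List.splitOnP_cons]
        by_cases hc : c = '\n'
        · subst hc
          simp only [List.isPrefixOf, beq_self_eq_true, Bool.true_and, if_pos,
            List.length_cons, List.length_nil, Nat.zero_add, List.drop_one, List.tail_cons]
          rw [ih fuel [] (cur.reverse :: acc) (Nat.le_of_succ_le_succ hf)]
          simp [List.modifyHead]
          cases List.splitOnP (· == '\n') rest <;> simp
        · have : List.isPrefixOf ['\n'] (c :: rest) = false := by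
            simp [List.isPrefixOf]; exact fun h => absurd h.symm hc
          rw [this]
          simp only [Bool.false_eq_true, if_neg, not_false_iff]
          rw [ih fuel (c :: cur) acc (Nat.le_of_succ_le_succ hf)]
          have hcb : (c == '\n') = false := by simpa using hc
          simp [hcb, List.modifyHead]
          cases List.splitOnP (· == '\n') rest <;> simp

theorem splitOn_eq_splitOnP (cs : List Char) :
    PySem.Chars.splitOn cs "\n".toList = List.splitOnP (· == '\n') cs := by
  have h := splitOn_go_newline cs (cs.length + 1) [] [] (Nat.le_succ _)
  have : PySem.Chars.splitOn cs "\n".toList = PySem.Chars.splitOn.go ['\n'] (cs.length + 1) cs [] [] := by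
    rfl
  rw [this, h]
  cases List.splitOnP (· == '\n') cs <;> simp [List.modifyHead]

theorem glue_spec_A (n : Int) : ∀ (M : List (List Char)) (s : Int) (res : List String),
    s + (M.length : Int) = n →
    (PySem.List.enumerate M s).foldl
      (fun result il => if il.1 < n - 1 then result ++ [String.ofList (il.2 ++ ['\n'])]
         else result ++ [String.ofList il.2]) res
      = res ++ msGlue M := by
  intro M
  induction M with
  | nil => intro s res _; simp [PySem.List.enumerate, msGlue]
  | cons p M' ih =>
      intro s res hs
      rw [PySem.List.enumerate_cons]
      cases M' with
      | nil =>
          have hns : ¬ (s < n - 1) := by simp at hs; omega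
          simp [PySem.List.enumerate, hns, msGlue]
      | cons q ps =>
          have hlt : s < n - 1 := by simp at hs; omega
          simp only [List.foldl_cons, if_pos hlt]
          rw [ih (s + 1) (res ++ [String.ofList (p ++ ['\n'])]) (by simp at hs ⊢; omega)]
          simp [msGlue]

theorem B_loop (cs : List Char) : ∀ (cur : List Char) (res : List String),
    msAltGo cs cur res = res ++ msGlue ((List.splitOnP (· == '\n') cs).modifyHead (cur ++ ·)) := by
  induction cs with
  | nil => intro cur res; simp [msAltGo, List.splitOnP_nil, List.modifyHead, msGlue]
  | cons c rest ih =>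
      intro cur res
      by_cases hc : c = '\n'
      · subst hc
        simp only [msAltGo, beq_self_eq_true, if_pos, List.splitOnP_cons]
        rw [ih [] (res ++ [String.ofList (cur ++ ['\n'])])]
        simp [List.modifyHead]
        rcases h : List.splitOnP (· == '\n') rest with _ | ⟨q, ps⟩
        · exact absurd h (List.splitOnP_ne_nil _ rest)
        · simp [msGlue]
      · have hcb : (c == '\n') = false := by simpa using hc
        simp only [msAltGo, hcb, Bool.false_eq_true, if_neg, not_false_iff, List.splitOnP_cons]
        rw [ih (cur ++ [c]) res]
        rcases h : List.splitOnP (· == '\n') rest with _ | ⟨q, ps⟩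
        · exact absurd h (List.splitOnP_ne_nil _ rest)
        · simp [List.modifyHead]

-- ===== VERDICT (by name: the statement is the Claim_ definition above) =====
theorem make_source_spec : Claim_equal_make_source := by
  intro text _
  unfold Spec_make_source make_source make_source_alt
  rw [splitOn_eq_splitOnP, B_loop]
  rw [glue_spec_A ((List.splitOnP (· == '\n') text.toList).length : Int)
        (List.splitOnP (· == '\n') text.toList) 0 [] (by omega)]
  rcases h : List.splitOnP (· == '\n') text.toList with _ | ⟨q, ps⟩
  · exact absurd h (List.splitOnP_ne_nil _ _)
  · simp [List.modifyHead]
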